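-- pv_equiv track=rewrite | github.com/Kazuyoshi-Mori/Numpre | numpre1assist3.py | suiteiSan
-- ===== SOURCE A (Python) =====
-- def suiteiSan(sudataNum, suiteiNum):
--     # 盤値の推定値ビットを０にする
--     suiteiList = [0b011111111, 0b101111111, 0b110111111,
--                   0b111011111, 0b111101111, 0b111110111,
--                   0b111111011, 0b111111101, 0b111111110]
--     for i in range(9):
--         if sudataNum == i + 1:
--             suiteiNum = suiteiNum & suiteiList[i]
--     return suiteiNum
-- ===== SOURCE B (Python) =====
-- def suiteiSan(sudataNum, suiteiNum):
--     # Modular-arithmetic form: no mask table, no loop, no bitwise operators.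
--     # Keep the low 9 bits with a floor-mod, then subtract the target binary
--     # digit (extracted with // and %), which is exactly what A's masks clear.
--     if sudataNum < 1 or sudataNum > 9:
--         return suiteiNum
--     low = suiteiNum % 512
--     p = 2 ** (9 - sudataNum)
--     return low - low // p % 2 * p
-- ===== Notes on version B (the rewrite author's own statement) =====
-- stated objective: simpler
-- what changed: Replaces the 9-entry bitmask table and the range(9) masking loop with pure modular arithmetic: take suiteiNum % 512 and subtract the target binary digit extracted with // and %, using no bitwise operators and no table.
import Mathlib
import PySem

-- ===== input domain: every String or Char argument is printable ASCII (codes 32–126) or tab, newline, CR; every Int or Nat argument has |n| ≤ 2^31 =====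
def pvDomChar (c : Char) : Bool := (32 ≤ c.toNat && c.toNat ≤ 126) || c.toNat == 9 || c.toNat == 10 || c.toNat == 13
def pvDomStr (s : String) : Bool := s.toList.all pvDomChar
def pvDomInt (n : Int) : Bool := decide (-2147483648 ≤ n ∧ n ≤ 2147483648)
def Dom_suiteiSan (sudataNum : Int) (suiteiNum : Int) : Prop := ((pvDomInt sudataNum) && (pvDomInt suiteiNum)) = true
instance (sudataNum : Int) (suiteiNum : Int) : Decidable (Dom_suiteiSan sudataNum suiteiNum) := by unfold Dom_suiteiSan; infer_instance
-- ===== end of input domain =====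

-- B replaces the 9-entry mask table and the masking loop with pure modular arithmetic
-- (% 512 plus digit extraction via // and %), with no bitwise operators (simpler).

-- ===== PORT A =====
def suiteiSan (sudataNum : Int) (suiteiNum : Int) : Int :=
  let suiteiList : List Int := [0b011111111, 0b101111111, 0b110111111,
                                0b111011111, 0b111101111, 0b111110111,
                                0b111111011, 0b111111101, 0b111111110]
  (PySem.List.pyRange 0 9 1).foldl
    (fun acc i => if sudataNum == i + 1 then PySem.Int.band acc (PySem.List.pyGetD suiteiList i 0) else acc)
    suiteiNum

-- ===== PORT B =====
def suiteiSan_alt (sudataNum : Int) (suiteiNum : Int) : Int :=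
  if sudataNum < 1 ∨ 9 < sudataNum then suiteiNum
  else
    let low := PySem.Int.mod suiteiNum 512
    let p : Int := 2 ^ (9 - sudataNum).toNat
    low - PySem.Int.mod (PySem.Int.floordiv low p) 2 * p

-- ===== PRECONDITION & SPEC =====
def Spec_suiteiSan (sudataNum : Int) (suiteiNum : Int) (out : Int) : Prop := out = suiteiSan_alt sudataNum suiteiNum
instance (sudataNum : Int) (suiteiNum : Int) (out : Int) : Decidable (Spec_suiteiSan sudataNum suiteiNum out) := by unfold Spec_suiteiSan; infer_instance

-- ===== CLAIM =====
def Claim_equal_suiteiSan : Prop := ∀ (sudataNum : Int) (suiteiNum : Int), Dom_suiteiSan sudataNum suiteiNum → Spec_suiteiSan sudataNum suiteiNum (suiteiSan sudataNum suiteiNum)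

-- ===== LEMMAS AND PROOFS =====

-- Nat.and on one argument only depends on that argument mod 512 when the other is < 512.
theorem natAnd_mod512 (a m : Nat) (hm : m < 512) : a &&& m = (a % 512) &&& m := by
  apply Nat.eq_of_testBit_eq
  intro i
  rcases lt_or_ge i 9 with hi | hi
  · have h512 : (512 : Nat) = 2 ^ 9 := by norm_num
    simp only [Nat.testBit_and]
    rw [h512, Nat.testBit_mod_two_pow]
    simp [hi]
  · have hmi : m.testBit i = false := by
      apply Nat.testBit_lt_two_pow
      calc m < 512 := hm
        _ ≤ 2 ^ i := by
          calc (512:Nat) = 2 ^ 9 := by norm_num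
            _ ≤ 2 ^ i := Nat.pow_le_pow_right (by norm_num) hi
    simp [Nat.testBit_and, hmi]

-- Finite table facts, checked by kernel evaluation over all r < 512, k < 9.
set_option maxRecDepth 100000 in
theorem table_fact : ∀ (r : Fin 512) (k : Fin 9),
    (r.val &&& (511 - 2 ^ k.val) = r.val - r.val / 2 ^ k.val % 2 * 2 ^ k.val) ∧
    ((511 - 2 ^ k.val) - ((511 - 2 ^ k.val) &&& (511 - r.val)) = r.val - r.val / 2 ^ k.val % 2 * 2 ^ k.val) ∧
    (r.val / 2 ^ k.val % 2 * 2 ^ k.val ≤ r.val) := by decide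

-- The heart: A's masking equals B's arithmetic, for every mask position k < 9.
theorem band_mask_eq (v : Int) (k : Nat) (hk : k < 9) :
    PySem.Int.band v ((511 : Int) - 2 ^ k) =
      PySem.Int.mod v 512 -
        PySem.Int.mod (PySem.Int.floordiv (PySem.Int.mod v 512) (2 ^ k)) 2 * 2 ^ k := by
  have hp : (0:Int) < 2 ^ k := by positivity
  have hk256 : (2:Int) ^ k ≤ 256 := by
    calc (2:Int) ^ k ≤ 2 ^ 8 := pow_le_pow_right₀ (by norm_num) (by omega)
      _ = 256 := by norm_num
  have hpk1 : (1:Int) ≤ 2 ^ k := hp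
  set r := PySem.Int.mod v 512 with hrdef
  have hr0 : 0 ≤ r := PySem.Int.mod_nonneg v (by norm_num)
  have hrlt : r < 512 := PySem.Int.mod_lt v (by norm_num)
  have hremod : r = v % 512 := by rw [hrdef, PySem.Int.mod_eq_emod_of_pos (by norm_num)]
  set rn := r.toNat with hrn_def
  have hrcast : r = (rn : Int) := (Int.toNat_of_nonneg hr0).symm
  have hrnlt : rn < 512 := by omega
  have hpkNat : (2:Int) ^ k = ((2 ^ k : Nat) : Int) := by push_cast; ring
  have h2kNat : 2 ^ k ≤ 511 := by
    have : (2:Nat) ^ k ≤ 2 ^ 8 := Nat.pow_le_pow_right (by norm_num) (by omega)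
    omega
  have ht := table_fact ⟨rn, hrnlt⟩ ⟨k, hk⟩
  have h1 : rn &&& (511 - 2 ^ k) = rn - rn / 2 ^ k % 2 * 2 ^ k := ht.1
  have h2 : (511 - 2 ^ k) - ((511 - 2 ^ k) &&& (511 - rn)) = rn - rn / 2 ^ k % 2 * 2 ^ k := ht.2.1
  have h3 : rn / 2 ^ k % 2 * 2 ^ k ≤ rn := ht.2.2
  -- B side (RHS) as a Nat computation
  have hY : PySem.Int.mod (PySem.Int.floordiv r (2 ^ k)) 2 * 2 ^ k
      = ((rn / 2 ^ k % 2 * 2 ^ k : Nat) : Int) := by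
    rw [PySem.Int.floordiv_eq_ediv_of_pos hp, PySem.Int.mod_eq_emod_of_pos (by norm_num),
        hrcast, hpkNat]
    push_cast
    rfl
  have hmcast : (511 : Int) - 2 ^ k = ((511 - 2 ^ k : Nat) : Int) := by
    rw [hpkNat]; omega
  have hmlt : (511 - 2 ^ k : Nat) < 512 := by omega
  by_cases hv : 0 ≤ v
  · -- v ≥ 0
    rw [hmcast, PySem.Int.band_of_nonneg hv (by positivity)]
    have hvN : v = (v.toNat : Int) := (Int.toNat_of_nonneg hv).symm
    have hvmod : v.toNat % 512 = rn := by omega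
    rw [Int.toNat_natCast, natAnd_mod512 v.toNat (511 - 2 ^ k) hmlt, hvmod, h1, hY]
    omega
  · -- v < 0
    have hv' : v < 0 := by omega
    have hnv : 0 ≤ -v - 1 := by omega
    have hbandneg : PySem.Int.band v ((511 : Int) - 2 ^ k)
        = (((511 - 2 ^ k : Nat) - ((511 - 2 ^ k : Nat) &&& (-v - 1).toNat) : Nat) : Int) := by
      rw [hmcast]
      simp only [PySem.Int.band]
      rw [if_neg (by omega), if_pos (by positivity)]
      rw [Int.toNat_natCast]
    -- (-v-1) % 512 = 511 - rn
    have hwmod : (-v - 1).toNat % 512 = 511 - rn := by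
      have hmodint : (-v - 1) % 512 = ((511 - rn : Nat) : Int) := by
        have hrw : -v - 1 = ((511 - rn : Nat) : Int) + 512 * (-1 - v / 512) := by
          have : v % 512 = (rn : Int) := by rw [← hremod, hrcast]
          omega
        rw [hrw, Int.add_mul_emod_self_left]
        exact Int.emod_eq_of_lt (by positivity) (by omega)
      have htn : ((-v - 1).toNat : Int) = -v - 1 := Int.toNat_of_nonneg hnv
      omega
    rw [hbandneg,
        Nat.and_comm (511 - 2 ^ k) ((-v - 1).toNat),
        natAnd_mod512 ((-v - 1).toNat) (511 - 2 ^ k) hmlt, hwmod,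
        Nat.and_comm, h2, hY]
    omega

-- ===== VERDICT =====
theorem suiteiSan_spec : Claim_equal_suiteiSan := by
  intro n v _
  show _ = _
  by_cases h : 1 ≤ n ∧ n ≤ 9
  · obtain ⟨hlo, hhi⟩ := h
    interval_cases n
    · have hb := band_mask_eq v 8 (by norm_num)
      norm_num at hb
      simp only [suiteiSan, suiteiSan_alt]
      norm_num [PySem.List.pyRange, List.range_succ, PySem.List.pyGetD, PySem.List.pyGet?]
      exact hb
    · have hb := band_mask_eq v 7 (by norm_num)
      norm_num at hb
      simp only [suiteiSan, suiteiSan_alt]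
      norm_num [PySem.List.pyRange, List.range_succ, PySem.List.pyGetD, PySem.List.pyGet?]
      exact hb
    · have hb := band_mask_eq v 6 (by norm_num)
      norm_num at hb
      simp only [suiteiSan, suiteiSan_alt]
      norm_num [PySem.List.pyRange, List.range_succ, PySem.List.pyGetD, PySem.List.pyGet?]
      exact hb
    · have hb := band_mask_eq v 5 (by norm_num)
      norm_num at hb
      simp only [suiteiSan, suiteiSan_alt]
      norm_num [PySem.List.pyRange, List.range_succ, PySem.List.pyGetD, PySem.List.pyGet?]
      exact hb
    · have hb := band_mask_eq v 4 (by norm_num)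
      norm_num at hb
      simp only [suiteiSan, suiteiSan_alt]
      norm_num [PySem.List.pyRange, List.range_succ, PySem.List.pyGetD, PySem.List.pyGet?]
      exact hb
    · have hb := band_mask_eq v 3 (by norm_num)
      norm_num at hb
      simp only [suiteiSan, suiteiSan_alt]
      norm_num [PySem.List.pyRange, List.range_succ, PySem.List.pyGetD, PySem.List.pyGet?]
      exact hb
    · have hb := band_mask_eq v 2 (by norm_num)
      norm_num at hb
      simp only [suiteiSan, suiteiSan_alt]
      norm_num [PySem.List.pyRange, List.range_succ, PySem.List.pyGetD, PySem.List.pyGet?]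
      exact hb
    · have hb := band_mask_eq v 1 (by norm_num)
      norm_num at hb
      simp only [suiteiSan, suiteiSan_alt]
      norm_num [PySem.List.pyRange, List.range_succ, PySem.List.pyGetD, PySem.List.pyGet?]
      exact hb
    · have hb := band_mask_eq v 0 (by norm_num)
      norm_num at hb
      simp only [suiteiSan, suiteiSan_alt]
      norm_num [PySem.List.pyRange, List.range_succ, PySem.List.pyGetD, PySem.List.pyGet?]
      exact hb
  · have hB : suiteiSan_alt n v = v := by
      simp only [suiteiSan_alt]
      rw [if_pos (by omega : n < 1 ∨ 9 < n)]
    rw [hB]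
    have hne : ∀ k : Int, 1 ≤ k → k ≤ 9 → n ≠ k := by
      intro k hk1 hk9 hnk
      exact h ⟨by omega, by omega⟩
    simp only [suiteiSan]
    norm_num [PySem.List.pyRange_one_cons, PySem.List.pyRange_one_eq_nil, List.foldl,
      hne 1 (by norm_num) (by norm_num), hne 2 (by norm_num) (by norm_num),
      hne 3 (by norm_num) (by norm_num), hne 4 (by norm_num) (by norm_num),
      hne 5 (by norm_num) (by norm_num), hne 6 (by norm_num) (by norm_num),
      hne 7 (by norm_num) (by norm_num), hne 8 (by norm_num) (by norm_num),
      hne 9 (by norm_num) (by norm_num)]
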